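-- pv_equiv track=rewrite | github.com/realshiruizhou/NQueens | NQueens/NQueens.py | get_sorted_values
-- ===== SOURCE A (Python) =====
-- def get_sorted_values(state, var):
--     empty = []
--     for a in range(0, len(state)):
--         empty.append(a)
--     for b in range(0, len(state)):
--         if state[b] != -1:
--             if state[b] in empty:
--                 empty.remove(state[b])
--             if state[b] + abs(b - var) in empty:
--                 empty.remove(state[b] + abs(b - var))
--             if state[b] - abs(b - var) in empty:
--                 empty.remove(state[b] - abs(b - var))
--     return empty
-- ===== SOURCE B (Python) =====
-- def get_sorted_values(state, var):
--     def attacked(c):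
--         return any(s != -1 and (s == c or s + abs(b - var) == c or s - abs(b - var) == c)
--                    for b, s in enumerate(state))
--     return [c for c in range(len(state)) if not attacked(c)]
-- ===== Notes on version B (the rewrite author's own statement) =====
-- stated objective: simpler
-- what changed: Replaced A's build-a-table-then-iteratively-remove-attacked-values loop (with membership test + list.remove per queen) by a direct candidate filter: keep each column c iff no queen attacks it, via a per-candidate any-scan.
import Mathlib
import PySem

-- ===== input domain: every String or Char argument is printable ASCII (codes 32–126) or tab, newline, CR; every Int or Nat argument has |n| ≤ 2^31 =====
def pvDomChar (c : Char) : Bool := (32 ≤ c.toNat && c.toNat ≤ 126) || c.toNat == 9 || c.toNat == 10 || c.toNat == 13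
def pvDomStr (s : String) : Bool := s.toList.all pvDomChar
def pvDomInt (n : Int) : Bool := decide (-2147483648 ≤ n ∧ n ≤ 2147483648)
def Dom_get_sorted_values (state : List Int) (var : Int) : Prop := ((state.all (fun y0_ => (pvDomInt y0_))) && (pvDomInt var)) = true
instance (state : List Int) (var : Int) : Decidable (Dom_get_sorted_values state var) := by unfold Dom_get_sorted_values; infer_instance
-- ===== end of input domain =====

-- B replaces A's remove-attacked-values-from-a-table loop by a direct per-candidate filter (objective: simpler; same asymptotic cost).

-- ===== PORT A =====
-- one iteration of A's second loop, for queen at index p.1 with value p.2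
def pvStepA (var : Int) (empty : List Int) (p : Int × Int) : List Int :=
  if p.2 ≠ -1 then
    let e1 := if p.2 ∈ empty then (PySem.List.remove? empty p.2).getD empty else empty
    let v2 := p.2 + |p.1 - var|
    let e2 := if v2 ∈ e1 then (PySem.List.remove? e1 v2).getD e1 else e1
    let v3 := p.2 - |p.1 - var|
    if v3 ∈ e2 then (PySem.List.remove? e2 v3).getD e2 else e2
  else empty

def get_sorted_values (state : List Int) (var : Int) : List Int :=
  let empty := (List.range state.length).foldl (fun (acc : List Int) (a : Nat) => acc ++ [(a : Int)]) []
  (PySem.List.enumerate state).foldl (pvStepA var) empty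

-- ===== PORT B =====
def pvAttacked (var : Int) (c : Int) (p : Int × Int) : Bool :=
  p.2 != -1 && (p.2 == c || p.2 + |p.1 - var| == c || p.2 - |p.1 - var| == c)

def get_sorted_values_alt (state : List Int) (var : Int) : List Int :=
  ((List.range state.length).map (Int.ofNat)).filter
    (fun c => ! (PySem.List.enumerate state).any (pvAttacked var c))

-- ===== PRECONDITION & SPEC =====
def Spec_get_sorted_values (state : List Int) (var : Int) (out : List Int) : Prop := out = get_sorted_values_alt state var
instance (state : List Int) (var : Int) (out : List Int) : Decidable (Spec_get_sorted_values state var out) := by unfold Spec_get_sorted_values; infer_instance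

-- ===== CLAIM (what is proved, stated in full; the proofs are below) =====
def Claim_equal_get_sorted_values : Prop := ∀ (state : List Int) (var : Int), Dom_get_sorted_values state var → Spec_get_sorted_values state var (get_sorted_values state var)

-- ===== LEMMAS AND PROOFS =====

theorem pv_foldl_append (l : List Nat) (acc : List Int) :
    List.foldl (fun (acc : List Int) (a : Nat) => acc ++ [(a : Int)]) acc l = acc ++ l.map Int.ofNat := by
  induction l generalizing acc with
  | nil => simp
  | cons x xs ih => rw [List.foldl_cons, ih]; simp

theorem pv_condRemove (l : List Int) (v : Int) :
    (if v ∈ l then (PySem.List.remove? l v).getD l else l) = l.erase v := by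
  by_cases h : v ∈ l
  · rw [if_pos h, PySem.List.remove?_eq_some_erase _ _ h]; rfl
  · simp [h, List.erase_of_not_mem h]

theorem pv_stepA_filter (var : Int) (l : List Int) (hl : l.Nodup) (p : Int × Int) :
    pvStepA var l p = l.filter (fun c => ! pvAttacked var c p) := by
  by_cases h2 : p.2 = -1
  · simp [pvStepA, pvAttacked, h2]
  · have e1 := pv_condRemove l p.2
    have h1 : (l.erase p.2).Nodup := hl.erase _
    have e2 := pv_condRemove (l.erase p.2) (p.2 + |p.1 - var|)
    have h2' : ((l.erase p.2).erase (p.2 + |p.1 - var|)).Nodup := h1.erase _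
    have e3 := pv_condRemove ((l.erase p.2).erase (p.2 + |p.1 - var|)) (p.2 - |p.1 - var|)
    simp only [pvStepA, h2, if_pos, ne_eq, not_false_iff, e1, e2, e3]
    rw [h2'.erase_eq_filter, h1.erase_eq_filter, hl.erase_eq_filter,
        List.filter_filter, List.filter_filter]
    apply List.filter_congr
    intro c _
    have hb : (p.2 != -1) = true := by simp [h2]
    apply Bool.eq_iff_iff.mpr
    simp [pvAttacked, hb]
    generalize |p.1 - var| = d
    omega
  
theorem pv_foldl_stepA (var : Int) (qs : List (Int × Int)) (l : List Int) (hl : l.Nodup) :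
    qs.foldl (pvStepA var) l = l.filter (fun c => ! qs.any (pvAttacked var c)) := by
  induction qs generalizing l with
  | nil => simp
  | cons q qs ih =>
    rw [List.foldl_cons, pv_stepA_filter var l hl q, ih _ (hl.filter _), List.filter_filter]
    apply List.filter_congr
    intro c _
    simp [Bool.and_comm]

-- ===== VERDICT (by name: the statement is the Claim_ definition above) =====
theorem get_sorted_values_spec : Claim_equal_get_sorted_values := by
  intro state var _
  unfold Spec_get_sorted_values get_sorted_values get_sorted_values_alt
  rw [pv_foldl_append, List.nil_append]
  exact pv_foldl_stepA var _ _
    (List.nodup_range.map (fun a b h => Int.ofNat.inj h))
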